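-- pv_equiv track=rewrite | github.com/james-chang727/Python_practice | Prime Factorization.py | print_factors
-- ===== SOURCE A (Python) =====
-- def print_factors(factors):
--   """Takes in a list of factors and formats it."""
--   unique_factors = sorted(list(set(factors)))
--   string = ""
--   for factor in unique_factors:
--     string += str(factor)
--     factor_count = factors.count(factor)
--     if factor_count > 1:
--       string += f"^{factor_count}"
--     string += "*"
--   return string[:-1] # get rid of one trailing "*"
-- ===== SOURCE B (Python) =====
-- def print_factors(factors):
--   """Takes in a list of factors and formats it."""
--   s = sorted(factors)
--   n = len(s)
--   parts = []
--   i = 0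
--   while i < n:
--     v = s[i]
--     j = i + 1
--     while j < n and s[j] == v:
--       j += 1
--     c = j - i
--     parts.append(str(v) + (f"^{c}" if c > 1 else ""))
--     i = j
--   return "*".join(parts)
-- ===== Notes on version B (the rewrite author's own statement) =====
-- stated objective: faster
-- what changed: B sorts the whole list once and formats it in a single linear pass that groups consecutive equal runs and joins the parts with '*', instead of A's set-dedup plus a full factors.count scan per unique value and a trailing-'*' strip.
import Mathlib
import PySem

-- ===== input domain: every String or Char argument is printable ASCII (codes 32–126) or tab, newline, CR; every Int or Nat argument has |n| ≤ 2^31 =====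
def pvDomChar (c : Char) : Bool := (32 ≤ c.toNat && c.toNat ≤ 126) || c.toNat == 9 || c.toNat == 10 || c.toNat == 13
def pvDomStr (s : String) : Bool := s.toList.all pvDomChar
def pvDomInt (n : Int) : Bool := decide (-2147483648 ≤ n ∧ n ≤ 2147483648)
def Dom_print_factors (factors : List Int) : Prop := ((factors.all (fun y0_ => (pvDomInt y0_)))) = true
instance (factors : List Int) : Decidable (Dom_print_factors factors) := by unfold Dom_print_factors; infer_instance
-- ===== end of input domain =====

-- B sorts the whole list once and formats it in one recursive pass over consecutive equal
-- runs joined with '*', replacing A's set-dedup plus per-unique full `.count` scans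
-- (objective: faster).

-- ===== PORT A =====
def print_factors (factors : List Int) : String :=
  let unique_factors := PySem.List.sorted (PySem.Set.ofList factors) (fun x => x) false
  let string := unique_factors.foldl (fun string factor =>
    let string := string ++ PySem.Int.toStr factor
    let factor_count : Int := (factors.count factor : Int)
    let string := if factor_count > 1 then string ++ "^" ++ PySem.Int.toStr factor_count else string
    string ++ "*") ""
  PySem.Str.slice string none (some (-1))

-- ===== PORT B =====
-- B's grouping pass, as structural recursion on the sorted list's suffix: the inner
-- while loop counting the run past position i is `takeWhile`'s length on the tail, and
-- continuing the outer loop at j = i + 1 + run is recursing on `rest.drop run`.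
def pvRuns : List Int → List String
  | [] => []
  | v :: rest =>
    let run := (rest.takeWhile (fun x => x == v)).length
    let c : Int := (run : Int) + 1
    (PySem.Int.toStr v ++ (if c > 1 then "^" ++ PySem.Int.toStr c else ""))
      :: pvRuns (rest.drop run)
termination_by s => s.length
decreasing_by
  simp only [List.length_drop, List.length_cons]; omega

def print_factors_alt (factors : List Int) : String :=
  PySem.Str.join "*" (pvRuns (PySem.List.sorted factors (fun x => x) false))

-- ===== PRECONDITION & SPEC =====
def Spec_print_factors (factors : List Int) (out : String) : Prop := out = print_factors_alt factors
instance (factors : List Int) (out : String) : Decidable (Spec_print_factors factors out) := by unfold Spec_print_factors; infer_instance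

-- ===== CLAIM (what is proved, stated in full; the proofs are below) =====
def Claim_equal_print_factors : Prop := ∀ (factors : List Int), Dom_print_factors factors → Spec_print_factors factors (print_factors factors)

-- ===== LEMMAS AND PROOFS =====

-- the formatted piece for one unique factor (A's shape)
def pvPart (factors : List Int) (v : Int) : String :=
  if ((factors.count v : Int)) > 1 then PySem.Int.toStr v ++ "^" ++ PySem.Int.toStr ((factors.count v : Int))
  else PySem.Int.toStr v

theorem pv_str_ext {s t : String} (h : s.toList = t.toList) : s = t := by
  have := congrArg String.ofList h
  simpa using this

-- A's loop, expanded: accumulator ++ each part followed by '*'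
theorem pv_foldA (factors : List Int) (l : List Int) (a : String) :
    (l.foldl (fun string factor =>
      let string := string ++ PySem.Int.toStr factor
      let factor_count : Int := (factors.count factor : Int)
      let string := if factor_count > 1 then string ++ "^" ++ PySem.Int.toStr factor_count else string
      string ++ "*") a).toList
    = a.toList ++ (l.map (fun v => (pvPart factors v).toList ++ ['*'])).flatten := by
  induction l generalizing a with
  | nil => simp
  | cons x xs ih =>
    simp only [List.foldl_cons, List.map_cons, List.flatten_cons, ih]
    unfold pvPart
    split_ifs <;> simp

-- grouping a strictly-increasing list of runs: pvRuns of the concatenated replicates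
theorem pv_runs_flatMap (c : Int → Nat) :
    ∀ (u : List Int), u.Pairwise (· < ·) → (∀ v ∈ u, 0 < c v) →
    pvRuns (u.flatMap (fun v => List.replicate (c v) v))
      = u.map (fun v =>
          PySem.Int.toStr v ++ (if ((c v : Nat) : Int) > 1 then "^" ++ PySem.Int.toStr ((c v : Nat) : Int) else "")) := by
  intro u
  induction u with
  | nil => intro _ _; simp [pvRuns]
  | cons v u' ih =>
    intro hpw hpos
    have hlt : ∀ w ∈ u', v < w := fun w hw => (List.pairwise_cons.1 hpw).1 w hw
    have hcv : 0 < c v := hpos v (by simp)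
    have hrep : List.replicate (c v) v = v :: List.replicate (c v - 1) v := by
      rw [← List.replicate_succ]; congr 1; omega
    have hrest : ∀ x ∈ u'.flatMap (fun w => List.replicate (c w) w), ¬ (x == v) = true := by
      intro x hx
      obtain ⟨w, hw, hxw⟩ := List.mem_flatMap.1 hx
      have := List.eq_of_mem_replicate hxw
      subst this
      simp only [beq_iff_eq]
      exact fun h => absurd (h ▸ hlt x hw) (lt_irrefl v)
    have htake : ((List.replicate (c v - 1) v ++ u'.flatMap (fun w => List.replicate (c w) w)).takeWhile (fun x => x == v))
        = List.replicate (c v - 1) v := by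
      rw [List.takeWhile_append_of_pos (by intro x hx; simp [List.eq_of_mem_replicate hx])]
      have : (u'.flatMap (fun w => List.replicate (c w) w)).takeWhile (fun x => x == v) = [] := by
        cases hfm : u'.flatMap (fun w => List.replicate (c w) w) with
        | nil => rfl
        | cons a t => exact List.takeWhile_cons_of_neg (by simpa using hrest a (by rw [hfm]; simp))
      simp [this]
    rw [List.flatMap_cons, hrep]
    show pvRuns (v :: (List.replicate (c v - 1) v ++ u'.flatMap fun w => List.replicate (c w) w)) = _
    rw [pvRuns]
    simp only [htake, List.length_replicate]
    have hdrop : (List.replicate (c v - 1) v ++ u'.flatMap (fun w => List.replicate (c w) w)).drop (c v - 1)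
        = u'.flatMap (fun w => List.replicate (c w) w) := by
      simp
    rw [hdrop, ih (List.pairwise_cons.1 hpw).2 (fun w hw => hpos w (by simp [hw]))]
    simp only [List.map_cons, List.cons.injEq]
    constructor
    · have : ((c v - 1 : Nat) : Int) + 1 = ((c v : Nat) : Int) := by omega
      rw [this]
    · trivial

-- count in the concatenation of count-many replicates over a nodup list
theorem pv_count_flat (c : Int → Nat) :
    ∀ (u : List Int), u.Nodup → ∀ (x : Int),
      (u.flatMap (fun v => List.replicate (c v) v)).count x = if x ∈ u then c x else 0 := by
  intro u
  induction u with
  | nil => intro _ x; simp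
  | cons v u' ih =>
    intro hn x
    rw [List.flatMap_cons, List.count_append, List.count_replicate, ih hn.of_cons x]
    by_cases hx : x = v
    · subst hx
      simp [fun h => (List.nodup_cons.1 hn).1 h]
    · simp [hx, Ne.symm hx]

theorem pv_flat_pairwise (c : Int → Nat) :
    ∀ (u : List Int), u.Pairwise (· < ·) →
      (u.flatMap (fun v => List.replicate (c v) v)).Pairwise (· ≤ ·) := by
  intro u
  induction u with
  | nil => intro _; simp
  | cons v u' ih =>
    intro hpw
    rw [List.flatMap_cons]
    refine List.pairwise_append.2 ⟨?_, ih (List.pairwise_cons.1 hpw).2, ?_⟩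
    · exact List.pairwise_replicate.2 (Or.inr le_rfl)
    · intro a ha b hb
      obtain ⟨w, hw, hbw⟩ := List.mem_flatMap.1 hb
      rw [List.eq_of_mem_replicate ha, List.eq_of_mem_replicate hbw]
      exact le_of_lt ((List.pairwise_cons.1 hpw).1 w hw)

theorem pv_sorted_factorization (factors : List Int) :
    PySem.List.sorted factors (fun x => x) false
      = (PySem.List.sorted (PySem.Set.ofList factors) (fun x => x) false).flatMap
          (fun v => List.replicate (factors.count v) v) := by
  set u := PySem.List.sorted (PySem.Set.ofList factors) (fun x => x) false with hu
  have hperm_u : u.Perm (PySem.Set.ofList factors) := PySem.List.sorted_perm _ _ _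
  have hnod : u.Nodup := hperm_u.nodup_iff.2 (PySem.Set.nodup_ofList factors)
  have hmem : ∀ x : Int, x ∈ u ↔ x ∈ factors := by
    intro x
    rw [hu, PySem.List.mem_sorted, PySem.Set.mem_ofList]
  apply PySem.List.sorted_id_eq_of_perm_of_pairwise
  · rw [List.perm_iff_count]
    intro x
    rw [pv_count_flat _ u hnod x]
    by_cases hx : x ∈ factors
    · simp [(hmem x).2 hx]
    · simp [List.count_eq_zero.2 hx]
  · exact pv_flat_pairwise _ u (PySem.List.sorted_ofList_pairwise_lt factors)

-- flatten of '*'-terminated parts vs join with '*' separators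
theorem pv_flatten_join (parts : List (List Char)) (h : parts ≠ []) :
    (parts.map (· ++ ['*'])).flatten = PySem.Chars.join ['*'] parts ++ ['*'] := by
  induction parts with
  | nil => exact absurd rfl h
  | cons p rest ih =>
    cases rest with
    | nil => simp [PySem.Chars.join_singleton]
    | cons q r =>
      rw [List.map_cons, List.flatten_cons, ih (by simp), PySem.Chars.join_cons_cons]
      simp

-- ===== VERDICT (by name: the statement is the Claim_ definition above) =====
theorem print_factors_spec : Claim_equal_print_factors := by
  unfold Claim_equal_print_factors
  intro factors _
  unfold Spec_print_factors print_factors print_factors_alt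
  rw [pv_sorted_factorization factors,
      pv_runs_flatMap (fun v => factors.count v) _
        (PySem.List.sorted_ofList_pairwise_lt factors)
        (by intro v hv
            have : v ∈ factors := by
              have := (PySem.List.mem_sorted (xs := PySem.Set.ofList factors)
                (key := fun x => x) (rev := false) (x := v)).1 hv
              simpa [PySem.Set.mem_ofList] using this
            exact List.count_pos_iff.2 this)]
  apply pv_str_ext
  rw [PySem.Str.slice_to_neg_one, pv_foldA]
  rw [PySem.Str.toList_join]
  simp only [List.map_map]
  have hmap : (PySem.List.sorted (PySem.Set.ofList factors) (fun x => x) false).map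
      (String.toList ∘ fun v =>
        PySem.Int.toStr v ++ (if ((factors.count v : Nat) : Int) > 1 then "^" ++ PySem.Int.toStr ((factors.count v : Nat) : Int) else ""))
      = (PySem.List.sorted (PySem.Set.ofList factors) (fun x => x) false).map
        (fun v => (pvPart factors v).toList) := by
    apply List.map_congr_left; intro v _
    simp only [Function.comp_apply, pvPart]
    split_ifs <;> simp
  rw [hmap]
  cases hs : PySem.List.sorted (PySem.Set.ofList factors) (fun x => x) false with
  | nil => simp
  | cons x xs =>
    rw [show ((x :: xs).map (fun v => (pvPart factors v).toList ++ ['*']))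
        = (((x :: xs).map (fun v => (pvPart factors v).toList)).map (· ++ ['*'])) by
          simp [List.map_map]]
    rw [pv_flatten_join _ (by simp)]
    simp
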